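-- pv_equiv track=rewrite | github.com/404brtk/get-docs | src/core/robots_tags_parser.py | parse_robots_directives
-- ===== SOURCE A (Python) =====
-- def parse_robots_directives(value: str, bot_name: str | None = None) -> set[str]:
--     directives: dict[str | None, set[str]] = {}
--     context: str | None = None
--
--     for token in value.split(","):
--         token = token.strip()
--         if not token:
--             continue
--
--         if ":" in token:
--             name, directive = token.split(":", 1)
--             context = name.strip().lower()
--             directive = directive.strip().lower()
--             if directive:
--                 directives.setdefault(context, set()).add(directive)
--         else:
--             directives.setdefault(context, set()).add(token.lower())
--
--     result = directives.get(None, set())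
--     if bot_name is not None:
--         result = result | directives.get(bot_name.lower(), set())
--     return result
-- ===== SOURCE B (Python) =====
-- def parse_robots_directives(value, bot_name=None):
--     target = bot_name.lower() if bot_name is not None else None
--     result = set()
--     relevant = True  # current context is the global (None) one, always reported
--     for token in value.split(","):
--         token = token.strip()
--         if not token:
--             continue
--         if ":" in token:
--             name, directive = token.split(":", 1)
--             relevant = name.strip().lower() == target
--             directive = directive.strip().lower()
--             if directive and relevant:
--                 result.add(directive)
--         elif relevant:
--             result.add(token.lower())
--     return result
-- ===== Notes on version B (the rewrite author's own statement) =====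
-- stated objective: simpler
-- what changed: B drops A's dict-of-buckets-plus-final-selection entirely: it precomputes the lowered target once and keeps a single result set and a boolean context flag, adding a directive during the one pass exactly when the current context is the global one or the target bot.
import Mathlib
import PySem

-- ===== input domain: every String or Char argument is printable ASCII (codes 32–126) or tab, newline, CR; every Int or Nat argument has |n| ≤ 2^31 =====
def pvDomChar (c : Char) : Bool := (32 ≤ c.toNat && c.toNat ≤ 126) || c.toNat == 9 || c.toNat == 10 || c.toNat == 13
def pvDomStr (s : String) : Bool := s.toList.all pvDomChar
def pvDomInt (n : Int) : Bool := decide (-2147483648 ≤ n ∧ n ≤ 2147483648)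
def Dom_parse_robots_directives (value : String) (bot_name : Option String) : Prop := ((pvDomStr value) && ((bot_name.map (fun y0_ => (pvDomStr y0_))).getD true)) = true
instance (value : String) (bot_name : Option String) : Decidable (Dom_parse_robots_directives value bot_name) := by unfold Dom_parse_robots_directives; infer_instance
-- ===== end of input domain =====

-- B replaces A's dict of per-context directive sets (selected at the end) by a single result set
-- and a boolean context flag filled during the one pass; objective: simpler.


-- ===== PORT A =====
-- A keeps a dict from context (None = global) to a set of directives, then selects
-- the None bucket (∪ the bot's bucket when bot_name is given).
def pvAStep (st : PySem.Dict (Option String) (PySem.Set String) × Option String)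
    (token0 : String) : PySem.Dict (Option String) (PySem.Set String) × Option String :=
  let token := PySem.Str.strip token0
  if token == "" then st
  else if PySem.Str.isIn ":" token then
    match PySem.Str.splitMax? token ":" 1 with
    | some [name, directive0] =>
        let ctx : Option String := some (PySem.Str.lower (PySem.Str.strip name))
        let directive := PySem.Str.lower (PySem.Str.strip directive0)
        if directive == "" then (st.1, ctx)
        else (st.1.insert ctx ((st.1.getD ctx PySem.Set.empty).add directive), ctx)
    | _ => st  -- unreachable: ":" ∈ token guarantees two pieces
  else (st.1.insert st.2 ((st.1.getD st.2 PySem.Set.empty).add (PySem.Str.lower token)), st.2)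

def parse_robots_directives (value : String) (bot_name : Option String) : List String :=
  let fin := ((PySem.Str.split? value ",").getD []).foldl pvAStep (PySem.Dict.empty, none)
  match bot_name with
  | none => fin.1.getD none PySem.Set.empty
  | some b => PySem.Set.union (fin.1.getD none PySem.Set.empty)
      (fin.1.getD (some (PySem.Str.lower b)) PySem.Set.empty)

-- ===== PORT B =====
-- B keeps ONE result set and a 'relevant' flag (is the current context reported?),
-- adding directives during the single pass; no dict of buckets.
def pvBStep (target : Option String) (st : PySem.Set String × Bool)
    (token0 : String) : PySem.Set String × Bool :=
  let token := PySem.Str.strip token0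
  if token == "" then st
  else if PySem.Str.isIn ":" token then
    match PySem.Str.splitMax? token ":" 1 with
    | some [name, directive0] =>
        let relevant := (some (PySem.Str.lower (PySem.Str.strip name)) == target)
        let directive := PySem.Str.lower (PySem.Str.strip directive0)
        if directive != "" && relevant then (st.1.add directive, relevant)
        else (st.1, relevant)
    | _ => st  -- unreachable: ":" ∈ token guarantees two pieces
  else if st.2 then (st.1.add (PySem.Str.lower token), st.2) else st

def parse_robots_directives_alt (value : String) (bot_name : Option String) : List String :=
  let target := bot_name.map PySem.Str.lower
  (((PySem.Str.split? value ",").getD []).foldl (pvBStep target) (PySem.Set.empty, true)).1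


-- ===== PRECONDITION & SPEC =====
def Spec_parse_robots_directives (value : String) (bot_name : Option String) (out : List String) : Prop := out = parse_robots_directives_alt value bot_name
instance (value : String) (bot_name : Option String) (out : List String) : Decidable (Spec_parse_robots_directives value bot_name out) := by unfold Spec_parse_robots_directives; infer_instance

-- ===== CLAIM (what is proved, stated in full; the proofs are below) =====
def Claim_equal_parse_robots_directives : Prop := ∀ (value : String) (bot_name : Option String), Dom_parse_robots_directives value bot_name → Spec_parse_robots_directives value bot_name (parse_robots_directives value bot_name)

-- ===== LEMMAS AND PROOFS =====
def pvQual (target : Option String) (ctx : Option String) : Bool :=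
  match ctx with
  | none => true
  | some c => some c == target

def pvSel (bot : Option String) (d : PySem.Dict (Option String) (PySem.Set String)) : PySem.Set String :=
  match bot with
  | none => d.getD none PySem.Set.empty
  | some b => PySem.Set.union (d.getD none PySem.Set.empty) (d.getD (some (PySem.Str.lower b)) PySem.Set.empty)

def pvInv (bot : Option String) (a : PySem.Dict (Option String) (PySem.Set String) × Option String)
    (b : PySem.Set String × Bool) : Prop :=
  b.2 = pvQual (bot.map PySem.Str.lower) a.2 ∧ b.1 = pvSel bot a.1 ∧
    (a.2 = none → ∀ s : String, a.1.getD (some s) PySem.Set.empty = PySem.Set.empty)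

lemma pv_union_add_right (s t : PySem.Set String) (x : String) :
    PySem.Set.union s (PySem.Set.add t x) = PySem.Set.add (PySem.Set.union s t) x := by
  by_cases hx : x ∈ t
  · simp [PySem.Set.add, hx]
  · simp only [PySem.Set.add, PySem.Set.contains_eq_listContains, List.contains_iff_mem,
      hx, if_false]
    rw [PySem.Set.union, PySem.Set.update_append, PySem.Set.update_cons, PySem.Set.update_nil]
    simp [PySem.Set.add, PySem.Set.union]

-- selection is unchanged by an insert at an unselected key
lemma pvSel_insert_irrelevant (bot : Option String) (d : PySem.Dict (Option String) (PySem.Set String))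
    (c : String) (v : PySem.Set String)
    (hne : (some c == bot.map PySem.Str.lower) = false) :
    pvSel bot (d.insert (some c) v) = pvSel bot d := by
  cases bot with
  | none => simp [pvSel, PySem.Dict.getD_insert]
  | some b =>
      have : PySem.Str.lower b ≠ c := by
        intro h; subst h; simp at hne
      simp [pvSel, PySem.Dict.getD_insert, this]

-- selection after an insert at the selected bot key
lemma pvSel_insert_bot (b : String) (d : PySem.Dict (Option String) (PySem.Set String)) (x : String) :
    pvSel (some b) (d.insert (some (PySem.Str.lower b))
        ((d.getD (some (PySem.Str.lower b)) PySem.Set.empty).add x)) =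
      PySem.Set.add (pvSel (some b) d) x := by
  simp [pvSel, PySem.Dict.getD_insert, pv_union_add_right]

lemma pvSel_insert_none (bot : Option String) (d : PySem.Dict (Option String) (PySem.Set String)) (x : String)
    (hb : ∀ b, bot = some b → d.getD (some (PySem.Str.lower b)) PySem.Set.empty = PySem.Set.empty) :
    pvSel bot (d.insert none ((d.getD none PySem.Set.empty).add x)) = PySem.Set.add (pvSel bot d) x := by
  cases bot with
  | none => simp [pvSel]
  | some b =>
      have hbb := hb b rfl
      simp only [PySem.Set.empty] at hbb
      simp [pvSel, PySem.Dict.getD_insert, hbb, PySem.Set.empty, PySem.Set.union,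
        PySem.Set.update_nil]

lemma pvStep_inv (bot : Option String) (a : PySem.Dict (Option String) (PySem.Set String) × Option String)
    (b : PySem.Set String × Bool) (t : String) (h : pvInv bot a b) :
    pvInv bot (pvAStep a t) (pvBStep (bot.map PySem.Str.lower) b t) := by
  obtain ⟨d, ctx⟩ := a
  obtain ⟨r, rel⟩ := b
  obtain ⟨h1, h2, h3⟩ := h
  simp only at h1 h2 h3
  simp only [pvAStep, pvBStep]
  by_cases he : (PySem.Str.strip t == "") = true
  · simp only [he, if_true]; exact ⟨h1, h2, h3⟩
  · simp only [he, if_false, Bool.false_eq_true]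
    by_cases hc : PySem.Str.isIn ":" (PySem.Str.strip t) = true
    · simp only [hc, if_true]
      rcases hsp : PySem.Str.splitMax? (PySem.Str.strip t) ":" 1 with _ | l
      · simp only [hsp]; exact ⟨h1, h2, h3⟩
      · rcases l with _ | ⟨n0, _ | ⟨d0, _ | _⟩⟩
        · simp only [hsp]; exact ⟨h1, h2, h3⟩
        · simp only [hsp]; exact ⟨h1, h2, h3⟩
        · -- the real colon case
          simp only [hsp]
          set c := PySem.Str.lower (PySem.Str.strip n0) with hc2
          set dir := PySem.Str.lower (PySem.Str.strip d0) with hd2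
          by_cases hde : (dir == "") = true
          · simp only [hde, if_true, bne, Bool.not_true, Bool.false_and]
            exact ⟨rfl, h2, by intro hx; cases hx⟩
          · simp only [hde, bne, Bool.not_false, Bool.true_and, Bool.false_eq_true]
            by_cases hrel : (some c == bot.map PySem.Str.lower) = true
            · simp only [hrel, if_true]
              refine ⟨by simp [pvQual, hrel], ?_, by intro hx; cases hx⟩
              rcases bot with _ | bb
              · simp at hrel
              · have hcb : PySem.Str.lower bb = c := by
                  simp [Option.map] at hrel; exact hrel.symm
                rw [if_neg not_false]
                simp only [h2, ← hcb, pvSel_insert_bot]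
            · simp only [hrel, if_false, Bool.false_eq_true]
              refine ⟨by simp [pvQual, hrel], ?_, by intro hx; cases hx⟩
              show r = pvSel bot (d.insert (some c) ((d.getD (some c) PySem.Set.empty).add dir))
              rw [h2, pvSel_insert_irrelevant bot d c _ (by simpa using hrel)]
        · simp only [hsp]; exact ⟨h1, h2, h3⟩
    · simp only [hc, if_false, Bool.false_eq_true]
      rcases hctx : ctx with _ | cc
      · -- global context: always relevant
        subst hctx
        have hr : rel = true := by simpa [pvQual] using h1
        simp only [hr, if_true]
        refine ⟨rfl, ?_, ?_⟩
        · rw [pvSel_insert_none bot d _ (fun b hb => by subst hb; exact h3 rfl _), h2]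
        · intro _ s
          simp only [PySem.Dict.getD_insert]
          simp only [reduceCtorEq, if_false]
          exact h3 rfl s
      · subst hctx
        by_cases hrel : rel = true
        · -- relevant named context
          have hq : (some cc == bot.map PySem.Str.lower) = true := by
            rw [hrel] at h1; exact h1.symm
          simp only [hrel, if_true]
          refine ⟨hq.symm, ?_, by intro hx; cases hx⟩
          rcases bot with _ | bb
          · simp at hq
          · have hcb : PySem.Str.lower bb = cc := by
              simp [Option.map] at hq; exact hq.symm
            simp only [h2, ← hcb, pvSel_insert_bot]
        · have hr : rel = false := by simpa using hrel
          simp only [hr, Bool.false_eq_true, if_false]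
          refine ⟨by rw [← hr]; exact h1, ?_, by intro hx; cases hx⟩

          rw [h2, pvSel_insert_irrelevant]
          rw [hr] at h1
          exact h1.symm

lemma pvLoop_inv (bot : Option String) (toks : List String)
    (a : PySem.Dict (Option String) (PySem.Set String) × Option String)
    (b : PySem.Set String × Bool) (h : pvInv bot a b) :
    pvInv bot (toks.foldl pvAStep a) (toks.foldl (pvBStep (bot.map PySem.Str.lower)) b) := by
  induction toks generalizing a b with
  | nil => exact h
  | cons t ts ih => exact ih _ _ (pvStep_inv bot a b t h)

-- ===== VERDICT (by name: the statement is the Claim_ definition above) =====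
theorem parse_robots_directives_spec : Claim_equal_parse_robots_directives := by
  intro value bot_name _
  unfold Spec_parse_robots_directives parse_robots_directives parse_robots_directives_alt
  have h0 : pvInv bot_name (PySem.Dict.empty, none) (PySem.Set.empty, true) := by
    refine ⟨rfl, ?_, fun _ s => rfl⟩
    cases bot_name <;> rfl
  have h := pvLoop_inv bot_name ((PySem.Str.split? value ",").getD []) _ _ h0
  rcases h with ⟨-, h2, -⟩
  rw [h2]
  cases bot_name <;> rfl
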